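-- pv_equiv track=rewrite | github.com/benjsmith/curiosity-engine | scripts/local_ingest.py | _flatten_header_band
-- ===== SOURCE A (Python) =====
-- def _flatten_header_band(rows: list, band_size: int) -> list:
--     """Collapse `band_size` leading header rows into a single composite row.
--
--     Per column, joins the unique non-empty values across band rows with
--     `" / "` (e.g. row 1 `2024`, row 2 `Q1` → `2024 / Q1`). De-duplicates
--     repeated values within a column so a propagated super-header doesn't
--     appear twice. Returns the flattened header followed by all data
--     rows. No-ops when band_size ≤ 1.
--     """
--     if band_size <= 1 or len(rows) <= band_size:
--         return rows
--     width = max(len(r) for r in rows[:band_size])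
--     composite = []
--     for col in range(width):
--         parts: list = []
--         seen: set = set()
--         for r in rows[:band_size]:
--             val = r[col] if col < len(r) else None
--             if val is None:
--                 continue
--             s = str(val).strip()
--             if not s or s in seen:
--                 continue
--             parts.append(s)
--             seen.add(s)
--         composite.append(" / ".join(parts))
--     return [composite] + rows[band_size:]
-- ===== SOURCE B (Python) =====
-- def _flatten_header_band(rows: list, band_size: int) -> list:
--     """Peel-the-first-column transpose: repeatedly strip the leading cell of
--     every band row (no width computation, no indexing, no seen-set), then
--     order-preserving dedup per column via dict.fromkeys."""
--     if band_size <= 1 or len(rows) <= band_size: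
--         return rows
--     rest = rows[:band_size]
--     composite = []
--     while any(rest):
--         col = [r[0] for r in rest if r]
--         keep = dict.fromkeys(
--             s for v in col if v is not None for s in [str(v).strip()] if s)
--         composite.append(" / ".join(keep))
--         rest = [r[1:] for r in rest]
--     return [composite] + rows[band_size:]
-- ===== Notes on version B (the rewrite author's own statement) =====
-- stated objective: alternative
-- what changed: Replaces A's width computation plus index-based column scan with a seen-set by a peel-first-column transpose loop (slice off the head cell of every band row until all rows are exhausted) and an order-preserving dict.fromkeys dedup per column.
-- outside the precondition, e.g. on _flatten_header_band([[None], ['a'], [None]], 2): A returns [['a'], [None]], B returns [['a'], [None]]; on _flatten_header_band([[None, 'x']], 0): A returns [[None, 'x']], B returns [[None, 'x']]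
import Mathlib
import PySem

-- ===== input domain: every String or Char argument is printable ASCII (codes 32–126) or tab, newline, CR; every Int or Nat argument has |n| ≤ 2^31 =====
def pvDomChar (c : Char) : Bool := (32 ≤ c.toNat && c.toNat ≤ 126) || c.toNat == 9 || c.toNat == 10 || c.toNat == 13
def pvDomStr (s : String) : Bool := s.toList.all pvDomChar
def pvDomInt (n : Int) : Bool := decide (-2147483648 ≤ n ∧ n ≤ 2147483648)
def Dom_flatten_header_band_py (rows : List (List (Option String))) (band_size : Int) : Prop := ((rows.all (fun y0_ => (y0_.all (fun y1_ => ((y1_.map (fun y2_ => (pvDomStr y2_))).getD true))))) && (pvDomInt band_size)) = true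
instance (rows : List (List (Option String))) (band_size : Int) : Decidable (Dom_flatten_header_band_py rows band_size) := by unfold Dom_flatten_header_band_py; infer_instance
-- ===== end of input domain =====

-- B peels the first column off every band row in a loop instead of A's index-based
-- column scan with a width computation and a seen-set; same cost, alternative structure.
-- The equivalence is about the RETURN value only (neither program mutates its arguments).

-- ===== PORT A =====
def flatten_header_band_py (rows : List (List (Option String))) (band_size : Int) : List (List String) :=
  if band_size ≤ 1 ∨ (rows.length : Int) ≤ band_size then
    -- Python returns `rows` verbatim here; under Pre_ every cell is `some`,
    -- so `Option.getD ""` is just the injection into the declared type.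
    rows.map (fun r => r.map (fun v => v.getD ""))
  else
    let band := rows.take band_size.toNat
    -- band ≠ [] under the guard, so Python's max never raises; `.getD 0` is unreachable
    let width := (PySem.List.max? (band.map (fun r => (r.length : Int))) (fun x => x)).getD 0
    let composite := (PySem.List.pyRange 0 width 1).foldl (fun composite col =>
      let st := band.foldl (fun (st : List String × PySem.Set String) r =>
        let val : Option String := if col < (r.length : Int) then PySem.List.pyGetD r col none else none
        match val with
        | none => st
        | some v =>
          let s := PySem.Str.strip v
          if s = "" ∨ PySem.Set.contains st.2 s then st
          else (st.1 ++ [s], PySem.Set.add st.2 s)) ([], PySem.Set.empty)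
      composite ++ [PySem.Str.join " / " st.1]) []
    composite :: (rows.drop band_size.toNat).map (fun r => r.map (fun v => v.getD ""))

-- ===== PORT B =====
-- termination helper for the peel loop (cited by `decreasing_by`)
theorem pvSumTails_lt (band : List (List (Option String)))
    (h : band.any (fun r => !r.isEmpty) = true) :
    ((band.map List.tail).map List.length).sum < (band.map List.length).sum := by
  induction band with
  | nil => simp at h
  | cons r t ih =>
    rcases r with _ | ⟨x, r'⟩
    · simpa using ih (by simpa using h)
    · simp only [List.map_cons, List.tail_cons, List.sum_cons, List.length_cons]
      have hle : ((t.map List.tail).map List.length).sum ≤ (t.map List.length).sum := by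
        clear h ih
        induction t with
        | nil => simp
        | cons s u ihu =>
          simp only [List.map_cons, List.sum_cons]
          have : s.tail.length ≤ s.length := by
            cases s <;> simp
          omega
      omega

-- `while any(rest): composite.append(col); rest = [r[1:] for r in rest]`
def transposeP (band : List (List (Option String))) : List (List (Option String)) :=
  if h : band.any (fun r => !r.isEmpty) = true then
    band.filterMap List.head? :: transposeP (band.map List.tail)
  else []
termination_by (band.map List.length).sum
decreasing_by simpa using pvSumTails_lt band h

def flatten_header_band_py_alt (rows : List (List (Option String))) (band_size : Int) : List (List String) :=
  if band_size ≤ 1 ∨ (rows.length : Int) ≤ band_size then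
    rows.map (fun r => r.map (fun v => v.getD ""))
  else
    let composite := (transposeP (rows.take band_size.toNat)).map (fun col =>
      PySem.Str.join " / " (PySem.List.dedup (col.filterMap (fun v => v.bind (fun x =>
        let s := PySem.Str.strip x
        if s = "" then none else some s)))))
    composite :: (rows.drop band_size.toNat).map (fun r => r.map (fun v => v.getD ""))

-- ===== PRECONDITION & SPEC =====
-- Pre_ excludes exactly the inputs on which A's Python return value is not of the declared
-- type List (List String): whenever a row that A returns verbatim (every row in the no-op
-- branch, the data rows rows[band_size:] otherwise) contains a None cell.
def Pre_flatten_header_band_py (rows : List (List (Option String))) (band_size : Int) : Prop :=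
  ((if band_size ≤ 1 ∨ (rows.length : Int) ≤ band_size then rows else rows.drop band_size.toNat).all
    (fun r => r.all (fun v => v.isSome))) = true
instance (rows : List (List (Option String))) (band_size : Int) : Decidable (Pre_flatten_header_band_py rows band_size) := by unfold Pre_flatten_header_band_py; infer_instance

def pvWitness_flatten_header_band_py : List (List (Option String)) × Int :=
  ([[some "2024", some "2024"], [some "Q1", none], [some "v", some "w"]], 2)

def Spec_flatten_header_band_py (rows : List (List (Option String))) (band_size : Int) (out : List (List String)) : Prop := out = flatten_header_band_py_alt rows band_size
instance (rows : List (List (Option String))) (band_size : Int) (out : List (List String)) : Decidable (Spec_flatten_header_band_py rows band_size out) := by unfold Spec_flatten_header_band_py; infer_instance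

-- ===== CLAIM (what is proved, stated in full; the proofs are below) =====
def Claim_equal_flatten_header_band_py : Prop := ∀ (rows : List (List (Option String))) (band_size : Int), Dom_flatten_header_band_py rows band_size → Pre_flatten_header_band_py rows band_size → Spec_flatten_header_band_py rows band_size (flatten_header_band_py rows band_size)

-- ===== LEMMAS AND PROOFS =====

-- normalisation of a column's cells: drop None, strip, drop blank (the pipeline both programs share)
def pvNormCell (v : Option String) : Option String :=
  v.bind (fun x =>
    let s := PySem.Str.strip x
    if s = "" then none else some s)

def pvNorm (cells : List (Option String)) : List String :=
  cells.filterMap pvNormCell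

theorem pvNorm_cons_blank (v : String) (rest : List (Option String)) (hs : PySem.Str.strip v = "") :
    pvNorm (some v :: rest) = pvNorm rest := by
  simp [pvNorm, pvNormCell, hs]

theorem pvNorm_cons_some (v : String) (rest : List (Option String)) (hs : ¬ PySem.Str.strip v = "") :
    pvNorm (some v :: rest) = PySem.Str.strip v :: pvNorm rest := by
  simp [pvNorm, pvNormCell, hs]

def pvWidth (band : List (List (Option String))) : Nat :=
  (band.map List.length).foldl max 0

-- A's inner row loop over one column c computes the ordered dedup of the normalised column
theorem pvFoldRow (band : List (List (Option String))) (c : Nat) (p : List String) :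
    band.foldl (fun (st : List String × PySem.Set String) r =>
        let val : Option String := if (c : Int) < (r.length : Int) then PySem.List.pyGetD r (c : Int) none else none
        match val with
        | none => st
        | some v =>
          let s := PySem.Str.strip v
          if s = "" ∨ PySem.Set.contains st.2 s then st
          else (st.1 ++ [s], PySem.Set.add st.2 s)) (p, p)
    = ((pvNorm (band.filterMap (fun r => r[c]?))).foldl PySem.Set.add p,
       (pvNorm (band.filterMap (fun r => r[c]?))).foldl PySem.Set.add p) := by
  induction band generalizing p with
  | nil => rfl
  | cons r t ih =>
    rw [List.foldl_cons, List.filterMap_cons]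
    cases hv : r[c]? with
    | none =>
      have hlen : r.length ≤ c := List.getElem?_eq_none_iff.mp hv
      have hc : ¬ ((c : Int) < (r.length : Int)) := by exact_mod_cast not_lt.mpr hlen
      simp only [if_neg hc]
      exact ih p
    | some cell =>
      have hc : c < r.length := by
        by_contra hcon
        rw [List.getElem?_eq_none (by omega)] at hv
        simp at hv
      have hci : ((c : Int) < (r.length : Int)) := by exact_mod_cast hc
      have hget : PySem.List.pyGetD r (c : Int) none = cell := by
        rw [PySem.List.pyGetD_natCast, List.getD_eq_getElem _ _ hc]
        have h2 := List.getElem?_eq_getElem hc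
        rw [h2] at hv
        exact Option.some.inj hv
      cases cell with
      | none =>
        simp only [if_pos hci, hget]
        exact ih p
      | some v =>
        by_cases hs : PySem.Str.strip v = ""
        · simp only [if_pos hci, hget, hs, true_or, if_true]
          rw [pvNorm_cons_blank _ _ hs]
          exact ih p
        · by_cases hm : PySem.Str.strip v ∈ p
          · have hcont : PySem.Set.contains p (PySem.Str.strip v) = true :=
              (PySem.Set.contains_iff p _).mpr hm
            simp only [if_pos hci, hget, hcont, or_true, if_true]
            rw [pvNorm_cons_some _ _ hs, List.foldl_cons, PySem.Set.add_of_mem hm]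
            exact ih p
          · have hcont : PySem.Set.contains p (PySem.Str.strip v) = false :=
              Bool.eq_false_iff.mpr (fun hcon => hm ((PySem.Set.contains_iff p _).mp hcon))
            simp only [if_pos hci, hget, hs, hcont, Bool.false_eq_true, or_self, if_false]
            rw [PySem.Set.add_of_not_mem hm, pvNorm_cons_some _ _ hs, List.foldl_cons,
              PySem.Set.add_of_not_mem hm]
            exact ih (p ++ [PySem.Str.strip v])

theorem pvFoldMax_cast (t : List (List (Option String))) (a : Nat) :
    (t.map (fun r => (r.length : Int))).foldl max (a : Int) = (((t.map List.length).foldl max a : Nat) : Int) := by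
  induction t generalizing a with
  | nil => rfl
  | cons s u ih =>
    simp only [List.map_cons, List.foldl_cons, ← Nat.cast_max]
    exact ih (max a s.length)

theorem pvWidth_cons (r : List (Option String)) (t : List (List (Option String))) :
    pvWidth (r :: t) = (t.map List.length).foldl max r.length := by
  simp [pvWidth]

theorem pvWidthA (band : List (List (Option String))) (hne : band ≠ []) :
    (PySem.List.max? (band.map (fun r => (r.length : Int))) (fun x => x)).getD 0 = (pvWidth band : Int) := by
  cases band with
  | nil => exact absurd rfl hne
  | cons r t =>
    rw [List.map_cons, PySem.List.max?_id_cons, Option.getD_some, pvWidth_cons]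
    exact pvFoldMax_cast t r.length

theorem pvWidth_tail_aux (l : List (List (Option String))) (a : Nat) :
    (l.map (fun r => r.tail.length)).foldl max (a - 1) = ((l.map List.length).foldl max a) - 1 := by
  induction l generalizing a with
  | nil => rfl
  | cons s u ih =>
    simp only [List.map_cons, List.foldl_cons]
    rw [show max (a - 1) s.tail.length = max a s.length - 1 by rw [List.length_tail]; omega]
    exact ih (max a s.length)

theorem pvWidth_tail (band : List (List (Option String))) :
    pvWidth (band.map List.tail) = pvWidth band - 1 := by
  have h := pvWidth_tail_aux band 0
  simpa [pvWidth, List.map_map, Function.comp_def] using h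

theorem pvWidth_pos (band : List (List (Option String)))
    (h : band.any (fun r => !r.isEmpty) = true) : 0 < pvWidth band := by
  rcases List.any_eq_true.mp h with ⟨r, hr, hne⟩
  have h1 : 1 ≤ r.length := by
    cases r with
    | nil => simp at hne
    | cons a s => simp
  have h2 : r.length ∈ band.map List.length := List.mem_map_of_mem hr
  have h3 := (PySem.List.le_foldl_max (band.map List.length) 0).2 r.length h2
  unfold pvWidth
  omega

theorem pvWidth_zero (band : List (List (Option String)))
    (h : band.any (fun r => !r.isEmpty) = false) : pvWidth band = 0 := by
  induction band with
  | nil => rfl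
  | cons r t ih =>
    simp only [List.any_cons, Bool.or_eq_false_iff] at h
    have hr : r = [] := by
      cases r with
      | nil => rfl
      | cons a s => simp at h
    subst hr
    rw [pvWidth_cons]
    exact ih (by simpa using h.2)

theorem pvTailCol (band : List (List (Option String))) (c : Nat) :
    (band.map List.tail).filterMap (fun r => r[c]?) = band.filterMap (fun r => r[c + 1]?) := by
  induction band with
  | nil => rfl
  | cons r t ih =>
    simp only [List.map_cons, List.filterMap_cons, List.getElem?_tail, ih]

theorem pvTranspose (band : List (List (Option String))) :
    transposeP band = (List.range (pvWidth band)).map (fun c => band.filterMap (fun r => r[c]?)) := by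
  induction band using transposeP.induct with
  | case1 band h ih =>
    have ih' : transposeP (band.map List.tail)
        = (List.range (pvWidth (band.map List.tail))).map
            (fun c => (band.map List.tail).filterMap (fun r => r[c]?)) := by
      simpa using ih
    rw [transposeP, dif_pos h]
    have hw := pvWidth_pos band h
    obtain ⟨n, hn⟩ : ∃ n, pvWidth band = n + 1 := ⟨pvWidth band - 1, by omega⟩
    have htl : pvWidth (band.map List.tail) = n := by
      rw [pvWidth_tail, hn]; omega
    rw [hn, List.range_succ_eq_map, List.map_cons, ih', htl, List.map_map]
    congr 1
    · simp [List.head?_eq_getElem?]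
    · apply List.map_congr_left
      intro c _
      simp [pvTailCol band c]
  | case2 band h =>
    rw [transposeP, dif_neg h]
    rw [pvWidth_zero band (by simpa using h)]
    rfl

-- ===== VERDICT (by name: the statement is the Claim_ definition above) =====
theorem flatten_header_band_py_spec : Claim_equal_flatten_header_band_py := by
  intro rows band_size hdom hpre
  unfold Spec_flatten_header_band_py flatten_header_band_py flatten_header_band_py_alt
  by_cases hg : band_size ≤ 1 ∨ (rows.length : Int) ≤ band_size
  · rw [if_pos hg, if_pos hg]
  · rw [if_neg hg, if_neg hg]
    simp only []
    congr 1
    have hne : rows.take band_size.toNat ≠ [] := by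
      rcases not_or.mp hg with ⟨h1, h2⟩
      intro hcon
      rcases List.take_eq_nil_iff.mp hcon with h | h
      · omega
      · subst h
        simp at h2
        omega
    rw [pvWidthA _ hne, PySem.List.pyRange_one, PySem.List.foldl_append_singleton_eq_map,
      List.nil_append, pvTranspose, List.map_map, List.map_map]
    simp only [Int.sub_zero, Int.toNat_natCast]
    apply List.map_congr_left
    intro c _
    simp only [Function.comp_apply, zero_add]
    have hfold := pvFoldRow (rows.take band_size.toNat) c []
    rw [show (PySem.Set.empty : PySem.Set String) = ([] : List String) from rfl, hfold,
      ← PySem.Set.ofList_eq_foldl, ← PySem.List.dedup_eq_ofList]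
    rfl
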